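-- pv_equiv track=rewrite | github.com/ExeqTer91/open-neuro-data | galop_mode_analysis.py | detect_galop_pattern
-- ===== SOURCE A (Python) =====
-- def detect_galop_pattern(state_sequence):
--     galop_patterns = {'AAB': 0, 'ABB': 0, 'ABA': 0, 'ABC': 0}
--
--     for i in range(len(state_sequence) - 2):
--         s1, s2, s3 = state_sequence[i:i+3]
--
--         if s1 == s2 and s2 != s3:
--             galop_patterns['AAB'] += 1
--         elif s1 != s2 and s2 == s3:
--             galop_patterns['ABB'] += 1
--         elif s1 != s2 and s2 != s3 and s1 == s3:
--             galop_patterns['ABA'] += 1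
--         elif s1 != s2 and s2 != s3 and s1 != s3:
--             galop_patterns['ABC'] += 1
--
--     return galop_patterns
-- ===== SOURCE B (Python) =====
-- def detect_galop_pattern(state_sequence):
--     galop_patterns = {'AAB': 0, 'ABB': 0, 'ABA': 0, 'ABC': 0}
--     labels = ['A', 'B', 'C']
--     for i in range(len(state_sequence) - 2):
--         mapping = {}
--         key = ''
--         for v in state_sequence[i:i+3]:
--             if v not in mapping:
--                 mapping[v] = labels[len(mapping)]
--             key += mapping[v]
--         if key in galop_patterns:
--             galop_patterns[key] += 1
--     return galop_patterns
-- ===== Notes on version B (the rewrite author's own statement) =====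
-- stated objective: idiomatic
-- what changed: Replaces the four-way boolean branch chain per window by computing a canonical first-appearance relabeling key ('AAB','ABA',...) for each window via a small value-to-label dict and incrementing the counter keyed by it (guarded by membership so the all-equal 'AAA' window is skipped).
import Mathlib
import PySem

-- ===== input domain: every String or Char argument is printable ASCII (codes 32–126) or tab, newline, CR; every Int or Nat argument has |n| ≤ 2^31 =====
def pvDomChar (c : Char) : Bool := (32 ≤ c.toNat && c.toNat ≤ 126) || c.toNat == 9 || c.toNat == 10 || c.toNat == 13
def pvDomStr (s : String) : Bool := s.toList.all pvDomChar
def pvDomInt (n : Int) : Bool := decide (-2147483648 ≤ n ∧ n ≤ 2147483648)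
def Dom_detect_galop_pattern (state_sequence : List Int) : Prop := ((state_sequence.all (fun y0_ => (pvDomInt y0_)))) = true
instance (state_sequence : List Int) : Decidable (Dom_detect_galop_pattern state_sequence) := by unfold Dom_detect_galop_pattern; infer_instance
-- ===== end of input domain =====

set_option maxRecDepth 4000


-- B replaces A's per-window four-way equality branch chain by a canonical first-appearance
-- relabeling key per window, incremented through a membership-guarded dict lookup (idiomatic).

-- ===== PORT A =====
-- loop body of A (the branch chain); Python's `galop_patterns[k] += 1` is ported as
-- getD/insert — exact here since the four keys are always present in the dict.
def galopStepA (xs : List Int) (d : PySem.Dict String Int) (i : Int) : PySem.Dict String Int :=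
  match PySem.List.slice xs (some i) (some (i + 3)) with
  | [s1, s2, s3] =>
    if s1 = s2 ∧ s2 ≠ s3 then d.insert "AAB" (d.getD "AAB" 0 + 1)
    else if s1 ≠ s2 ∧ s2 = s3 then d.insert "ABB" (d.getD "ABB" 0 + 1)
    else if s1 ≠ s2 ∧ s2 ≠ s3 ∧ s1 = s3 then d.insert "ABA" (d.getD "ABA" 0 + 1)
    else if s1 ≠ s2 ∧ s2 ≠ s3 ∧ s1 ≠ s3 then d.insert "ABC" (d.getD "ABC" 0 + 1)
    else d
  | _ => d  -- unreachable: the 3-unpacking always succeeds for i in range(len-2)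

def detect_galop_pattern (state_sequence : List Int) : List (String × Int) :=
  ((PySem.List.pyRange 0 ((state_sequence.length : Int) - 2) 1).foldl
      (galopStepA state_sequence)
      (PySem.Dict.ofList [("AAB", 0), ("ABB", 0), ("ABA", 0), ("ABC", 0)])).items

-- ===== PORT B =====
-- Source B's inner loop: relabel the window's values to 'A','B','C' in first-appearance order;
-- `mapping[v]` / `labels[len(mapping)]` ported as getD/pyGetD with defaults that are never
-- reached (v was just inserted; a 3-element window has at most 3 distinct values).
def galopCanonKey (w : List Int) : String :=
  (w.foldl
      (fun (st : PySem.Dict Int String × String) v =>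
        let m := if st.1.contains v then st.1
                 else st.1.insert v (PySem.List.pyGetD ["A", "B", "C"] (st.1.size : Int) "")
        (m, st.2 ++ m.getD v ""))
      (PySem.Dict.empty, "")).2

def galopStepB (xs : List Int) (d : PySem.Dict String Int) (i : Int) : PySem.Dict String Int :=
  let key := galopCanonKey (PySem.List.slice xs (some i) (some (i + 3)))
  if d.contains key then d.insert key (d.getD key 0 + 1) else d

def detect_galop_pattern_alt (state_sequence : List Int) : List (String × Int) :=
  ((PySem.List.pyRange 0 ((state_sequence.length : Int) - 2) 1).foldl
      (galopStepB state_sequence)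
      (PySem.Dict.ofList [("AAB", 0), ("ABB", 0), ("ABA", 0), ("ABC", 0)])).items

-- ===== PRECONDITION & SPEC =====
def Spec_detect_galop_pattern (state_sequence : List Int) (out : List (String × Int)) : Prop := out = detect_galop_pattern_alt state_sequence
instance (state_sequence : List Int) (out : List (String × Int)) : Decidable (Spec_detect_galop_pattern state_sequence out) := by unfold Spec_detect_galop_pattern; infer_instance

-- ===== CLAIM (what is proved, stated in full; the proofs are below) =====
def Claim_equal_detect_galop_pattern : Prop := ∀ (state_sequence : List Int), Dom_detect_galop_pattern state_sequence → Spec_detect_galop_pattern state_sequence (detect_galop_pattern state_sequence)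

-- ===== LEMMAS AND PROOFS =====

-- invariant: the dict holds the four pattern keys and not the all-equal key "AAA"
def GalopInv (d : PySem.Dict String Int) : Prop :=
  d.contains "AAB" = true ∧ d.contains "ABB" = true ∧ d.contains "ABA" = true ∧
  d.contains "ABC" = true ∧ d.contains "AAA" = false

lemma galopCanonKey_cases (s1 s2 s3 : Int) :
    galopCanonKey [s1, s2, s3] =
      if s1 = s2 then (if s2 = s3 then "AAA" else "AAB")
      else if s2 = s3 then "ABB"
      else if s1 = s3 then "ABA"
      else "ABC" := by
  by_cases h12 : s1 = s2
  · by_cases h23 : s2 = s3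
    · subst h12; subst h23
      simp [galopCanonKey, PySem.Dict.contains_insert, PySem.Dict.contains_empty,
        PySem.Dict.getD_insert, PySem.Dict.getD_empty, PySem.Dict.size_insert,
        PySem.Dict.size_empty, PySem.List.pyGetD, PySem.List.pyIdx?]
    · subst h12
      have n32 : ¬ s3 = s1 := fun h => h23 h.symm
      simp [galopCanonKey, PySem.Dict.contains_insert, PySem.Dict.contains_empty,
        PySem.Dict.getD_insert, PySem.Dict.getD_empty, PySem.Dict.size_insert,
        PySem.Dict.size_empty, PySem.List.pyGetD, PySem.List.pyIdx?, h23, n32]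
  · by_cases h23 : s2 = s3
    · subst h23
      have n21 : ¬ s2 = s1 := fun h => h12 h.symm
      simp [galopCanonKey, PySem.Dict.contains_insert, PySem.Dict.contains_empty,
        PySem.Dict.getD_insert, PySem.Dict.getD_empty, PySem.Dict.size_insert,
        PySem.Dict.size_empty, PySem.List.pyGetD, PySem.List.pyIdx?, h12, n21]
    · by_cases h13 : s1 = s3
      · subst h13
        have n21 : ¬ s2 = s1 := fun h => h12 h.symm
        have n12 : ¬ s1 = s2 := h12
        simp [galopCanonKey, PySem.Dict.contains_insert, PySem.Dict.contains_empty,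
        PySem.Dict.getD_insert, PySem.Dict.getD_empty, PySem.Dict.size_insert,
        PySem.Dict.size_empty, PySem.List.pyGetD, PySem.List.pyIdx?, n12, n21, h23]
      · have n21 : ¬ s2 = s1 := fun h => h12 h.symm
        have n32 : ¬ s3 = s2 := fun h => h23 h.symm
        have n31 : ¬ s3 = s1 := fun h => h13 h.symm
        simp [galopCanonKey, PySem.Dict.contains_insert, PySem.Dict.contains_empty,
        PySem.Dict.getD_insert, PySem.Dict.getD_empty, PySem.Dict.size_insert,
        PySem.Dict.size_empty, PySem.List.pyGetD, PySem.List.pyIdx?, h12, h23, h13, n21, n32, n31]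

lemma galopStep_eq (xs : List Int) (i : Int) (d : PySem.Dict String Int)
    (hInv : GalopInv d) (a b c : Int)
    (hw : PySem.List.slice xs (some i) (some (i + 3)) = [a, b, c]) :
    galopStepA xs d i = galopStepB xs d i := by
  obtain ⟨hAAB, hABB, hABA, hABC, hAAA⟩ := hInv
  unfold galopStepA galopStepB
  rw [hw, galopCanonKey_cases]
  by_cases h12 : a = b <;> by_cases h23 : b = c <;> by_cases h13 : a = c <;>
    first
      | omega
      | (simp [h12, h23, h13, hAAB, hABB, hABA, hABC, hAAA]
         try (split_ifs <;> first | omega | rfl))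

lemma galopInv_stepA (xs : List Int) (i : Int) (d : PySem.Dict String Int)
    (hInv : GalopInv d) : GalopInv (galopStepA xs d i) := by
  obtain ⟨hAAB, hABB, hABA, hABC, hAAA⟩ := hInv
  unfold galopStepA
  split
  · split_ifs <;>
      simp [GalopInv, PySem.Dict.contains_insert, hAAB, hABB, hABA, hABC, hAAA]
  · exact ⟨hAAB, hABB, hABA, hABC, hAAA⟩

lemma slice_window (xs : List Int) (i : Int) (h0 : 0 ≤ i)
    (h : i < (xs.length : Int) - 2) :
    ∃ a b c, PySem.List.slice xs (some i) (some (i + 3)) = [a, b, c] := by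
  have h3 : PySem.List.slice xs (some i) (some (i + 3)) = (xs.drop i.toNat).take 3 := by
    rw [PySem.List.slice_toNat _ h0 (by omega)]
    congr 1
    omega
  have hlen : 3 ≤ (xs.drop i.toNat).length := by
    simp only [List.length_drop]
    omega
  obtain ⟨a, b, c, t, hd⟩ : ∃ a b c t, xs.drop i.toNat = a :: b :: c :: t := by
    match hdrop : xs.drop i.toNat with
    | [] => rw [hdrop] at hlen; simp at hlen
    | [a] => rw [hdrop] at hlen; simp at hlen
    | [a, b] => rw [hdrop] at hlen; simp at hlen
    | a :: b :: c :: t => exact ⟨a, b, c, t, rfl⟩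
  exact ⟨a, b, c, by rw [h3, hd]; rfl⟩

lemma galop_loop_eq (xs : List Int) (l : List Int) (d : PySem.Dict String Int)
    (hInv : GalopInv d)
    (hw : ∀ i ∈ l, ∃ a b c, PySem.List.slice xs (some i) (some (i + 3)) = [a, b, c]) :
    l.foldl (galopStepA xs) d = l.foldl (galopStepB xs) d := by
  induction l generalizing d with
  | nil => rfl
  | cons x t ih =>
    obtain ⟨a, b, c, hx⟩ := hw x (List.mem_cons_self ..)
    simp only [List.foldl_cons]
    rw [← galopStep_eq xs x d hInv a b c hx]
    exact ih _ (galopInv_stepA xs x d hInv) (fun j hj => hw j (List.mem_cons_of_mem _ hj))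

-- ===== VERDICT (by name: the statement is the Claim_ definition above) =====
theorem detect_galop_pattern_spec : Claim_equal_detect_galop_pattern := by
  intro xs _
  unfold Spec_detect_galop_pattern detect_galop_pattern detect_galop_pattern_alt
  rw [galop_loop_eq]
  · unfold GalopInv; decide
  · intro i hi
    rw [PySem.List.mem_pyRange_one] at hi
    exact slice_window xs i hi.1 hi.2
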